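-- pv_equiv track=rewrite | github.com/bopopescu/ray-legacy | examples/wordcount/wordcount.py | split_partitions
-- ===== SOURCE A (Python) =====
-- def split_partitions(sizes, num_partitions):
--   total_size = sum(sizes)
--   partition_size = (total_size + num_partitions - 1) // num_partitions
--   perm = sorted(range(len(sizes)), key=lambda k: sizes[k])
--   head, tail = perm, []
--   result = [[] for i in range(num_partitions-1)]
--   # first assign the first num_partitions - 1 partitions
--   for partition in range(len(result)):
--     cur_size = 0
--     while len(head) > 0:
--       elem = head.pop()
--       if sizes[elem] <= partition_size - cur_size:
--         result[partition].append(elem)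
--         cur_size += sizes[elem]
--       else:
--         tail.append(elem)
--     head, tail = list(reversed(tail)), []
--   # then assign the last partition
--   result.append(head)
--   return result
-- ===== SOURCE B (Python) =====
-- def split_partitions(sizes, num_partitions):
--   total_size = sum(sizes)
--   partition_size = (total_size + num_partitions - 1) // num_partitions
--   order = sorted(range(len(sizes)), key=lambda k: sizes[k])
--   order.reverse()  # scan order: largest first (ties: higher index first)
--   items = [(i, sizes[i]) for i in order]
--
--   # tournament tree over the scan order; each node caches the minimum ACTIVE
--   # size below it (None = nothing active), so a whole subtree that cannot
--   # contribute to the current partition is skipped in O(1).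
--   def build(seg):
--     if len(seg) == 1:
--       i, s = seg[0]
--       return [s, i]                       # leaf: [min-or-None, index]
--     mid = len(seg) // 2
--     l, r = build(seg[:mid]), build(seg[mid:])
--     return [minopt(l[0], r[0]), l, r]
--
--   def minopt(a, b):
--     if a is None:
--       return b
--     if b is None:
--       return a
--     return a if a <= b else b
--
--   def sweep(nd, cap, out):
--     # left-to-right over active leaves: take every item that fits, pruning
--     # subtrees whose minimum active size exceeds the current capacity
--     mn = nd[0]
--     if mn is None or mn > cap:
--       return cap
--     if len(nd) == 2:
--       out.append(nd[1])
--       nd[0] = None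
--       return cap - mn
--     cap = sweep(nd[1], cap, out)
--     cap = sweep(nd[2], cap, out)
--     nd[0] = minopt(nd[1][0], nd[2][0])
--     return cap
--
--   def collect(nd, out):
--     if nd[0] is None:
--       return
--     if len(nd) == 2:
--       out.append(nd[1])
--       return
--     collect(nd[1], out)
--     collect(nd[2], out)
--
--   tree = build(items) if items else None
--   result = []
--   for _ in range(num_partitions - 1):
--     taken = []
--     if tree is not None:
--       sweep(tree, partition_size, taken)
--     result.append(taken)
--   last = []
--   if tree is not None:
--     collect(tree, last)
--   last.reverse()
--   result.append(last)
--   return result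
-- ===== Notes on version B (the rewrite author's own statement) =====
-- stated objective: faster
-- what changed: Replaces A's per-partition full rescan of the remaining items (pop/tail/reverse list churn) by a min-cached tournament tree over the descending scan order: each partition is one pruned tree sweep that skips whole subtrees whose minimum active size exceeds the remaining capacity, so items too big for a partition are no longer touched one by one every round.
import Mathlib
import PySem

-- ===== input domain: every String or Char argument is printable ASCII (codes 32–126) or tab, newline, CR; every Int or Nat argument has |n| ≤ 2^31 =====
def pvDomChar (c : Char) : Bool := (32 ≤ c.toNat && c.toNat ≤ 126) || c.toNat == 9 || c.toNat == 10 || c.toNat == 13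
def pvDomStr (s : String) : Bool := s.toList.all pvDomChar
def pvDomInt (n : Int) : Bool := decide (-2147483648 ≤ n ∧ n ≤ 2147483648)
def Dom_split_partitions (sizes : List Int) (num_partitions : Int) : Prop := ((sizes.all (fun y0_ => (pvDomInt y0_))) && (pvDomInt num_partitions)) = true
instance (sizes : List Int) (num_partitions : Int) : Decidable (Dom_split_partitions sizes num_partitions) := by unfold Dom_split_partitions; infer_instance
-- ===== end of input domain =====

-- B replaces A's per-partition rescan of all remaining items by one pruned sweep of a
-- min-cached tournament tree (measured faster; asymptotically fewer item visits).
-- B mutates its tree in place in Python; neither version mutates the ARGUMENTS.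

-- ===== PORT A =====

-- the inner 'while len(head) > 0' loop: pop from the end of head, take if it fits
def pvWhileA (sizes : List Int) (P : Int) :
    List Int → List Int → Int → List Int → (List Int × List Int)
  | head, tail, cur, part =>
    match h : head.getLast? with
    | none => (part, tail)
    | some elem =>
      let head' := head.dropLast
      if PySem.List.pyGetD sizes elem 0 ≤ P - cur then
        pvWhileA sizes P head' tail (cur + PySem.List.pyGetD sizes elem 0) (part ++ [elem])
      else
        pvWhileA sizes P head' (tail ++ [elem]) cur part
  termination_by head => head.length
  decreasing_by all_goals
    · have : head ≠ [] := by intro hn; simp [hn] at h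
      simp [List.length_dropLast]
      cases head <;> simp_all

-- 'for partition in range(len(result))': one round per partition, head := reversed(tail)
def pvOuterA (sizes : List Int) (P : Int) :
    Nat → List Int → List (List Int) → (List Int × List (List Int))
  | 0, head, acc => (head, acc)
  | k + 1, head, acc =>
    let r := pvWhileA sizes P head [] 0 []
    pvOuterA sizes P k r.2.reverse (acc ++ [r.1])

def split_partitions (sizes : List Int) (num_partitions : Int) : List (List Int) :=
  let total_size := sizes.sum
  let partition_size := PySem.Int.floordiv (total_size + num_partitions - 1) num_partitions
  let perm := PySem.List.sorted (PySem.List.pyRange 0 sizes.length 1)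
      (fun k => PySem.List.pyGetD sizes k 0) false
  let r := pvOuterA sizes partition_size (num_partitions - 1).toNat perm []
  r.2 ++ [r.1]

-- ===== PORT B =====

-- tournament tree: each node caches the minimum ACTIVE size below it (none = all taken)
inductive PVTree where
  | leaf (mn : Option Int) (idx : Int)
  | node (mn : Option Int) (l : PVTree) (r : PVTree)
deriving DecidableEq, Repr

def pvMinopt : Option Int → Option Int → Option Int
  | none, b => b
  | some a, none => some a
  | some a, some b => if a ≤ b then some a else some b

def PVTree.mnOf : PVTree → Option Int
  | .leaf mn _ => mn
  | .node mn _ _ => mn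

def pvBuild : List (Int × Int) → PVTree
  | [] => PVTree.leaf none 0      -- never reached: Python only builds from nonempty item lists
  | [(i, s)] => PVTree.leaf (some s) i
  | p :: q :: rest =>
    let seg := p :: q :: rest
    let l := pvBuild (seg.take (seg.length / 2))
    let r := pvBuild (seg.drop (seg.length / 2))
    PVTree.node (pvMinopt l.mnOf r.mnOf) l r
  termination_by seg => seg.length
  decreasing_by
    · simp [List.length_take]; omega
    · simp; omega

-- one partition: left-to-right over active leaves, pruning subtrees whose min > cap
def pvSweep : PVTree → Int → (PVTree × Int × List Int)
  | PVTree.leaf none i, cap => (PVTree.leaf none i, cap, [])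
  | PVTree.leaf (some s) i, cap =>
    if s > cap then (PVTree.leaf (some s) i, cap, [])
    else (PVTree.leaf none i, cap - s, [i])
  | PVTree.node none l r, cap => (PVTree.node none l r, cap, [])
  | PVTree.node (some m) l r, cap =>
    if m > cap then (PVTree.node (some m) l r, cap, [])
    else
      let rl := pvSweep l cap
      let rr := pvSweep r rl.2.1
      (PVTree.node (pvMinopt rl.1.mnOf rr.1.mnOf) rl.1 rr.1, rr.2.1, rl.2.2 ++ rr.2.2)

def pvCollect : PVTree → List Int
  | PVTree.leaf none _ => []
  | PVTree.leaf (some _) i => [i]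
  | PVTree.node none _ _ => []
  | PVTree.node (some _) l r => pvCollect l ++ pvCollect r

def pvLoopB (P : Int) : Nat → Option PVTree → List (List Int) → (Option PVTree × List (List Int))
  | 0, t, acc => (t, acc)
  | k + 1, t, acc =>
    match t with
    | none => pvLoopB P k none (acc ++ [[]])
    | some tr =>
      let r := pvSweep tr P
      pvLoopB P k (some r.1) (acc ++ [r.2.2])

def split_partitions_alt (sizes : List Int) (num_partitions : Int) : List (List Int) :=
  let total_size := sizes.sum
  let partition_size := PySem.Int.floordiv (total_size + num_partitions - 1) num_partitions
  let order := (PySem.List.sorted (PySem.List.pyRange 0 sizes.length 1)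
      (fun k => PySem.List.pyGetD sizes k 0) false).reverse
  let items := order.map (fun i => (i, PySem.List.pyGetD sizes i 0))
  let t0 : Option PVTree := match items with | [] => none | p :: rest => some (pvBuild (p :: rest))
  let r := pvLoopB partition_size (num_partitions - 1).toNat t0 []
  let last := (match r.1 with | none => [] | some tr => pvCollect tr).reverse
  r.2 ++ [last]

-- ===== PRECONDITION & SPEC =====
-- Pre_ excludes exactly num_partitions = 0, where Python A raises ZeroDivisionError.
def Pre_split_partitions (sizes : List Int) (num_partitions : Int) : Prop := num_partitions ≠ 0
instance (sizes : List Int) (num_partitions : Int) : Decidable (Pre_split_partitions sizes num_partitions) := by unfold Pre_split_partitions; infer_instance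

def pvWitness_split_partitions : List Int × Int := ([5, 1, 3, 2], 2)

def Spec_split_partitions (sizes : List Int) (num_partitions : Int) (out : List (List Int)) : Prop := out = split_partitions_alt sizes num_partitions
instance (sizes : List Int) (num_partitions : Int) (out : List (List Int)) : Decidable (Spec_split_partitions sizes num_partitions out) := by unfold Spec_split_partitions; infer_instance

-- ===== CLAIM (what is proved, stated in full; the proofs are below) =====
def Claim_equal_split_partitions : Prop := ∀ (sizes : List Int) (num_partitions : Int), Dom_split_partitions sizes num_partitions → Pre_split_partitions sizes num_partitions → Spec_split_partitions sizes num_partitions (split_partitions sizes num_partitions)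

-- ===== LEMMAS AND PROOFS =====

-- common functional description: one left-to-right pass over (index, size) pairs in scan
-- order, taking what fits: (taken indices, kept pairs, final capacity)
def pvScan : Int → List (Int × Int) → (List Int × List (Int × Int) × Int)
  | cap, [] => ([], [], cap)
  | cap, (i, s) :: rest =>
    if s ≤ cap then
      let r := pvScan (cap - s) rest
      (i :: r.1, r.2.1, r.2.2)
    else
      let r := pvScan cap rest
      (r.1, (i, s) :: r.2.1, r.2.2)

def pvRounds (P : Int) : Nat → List (Int × Int) → (List (List Int) × List (Int × Int))
  | 0, rem => ([], rem)
  | k + 1, rem =>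
    let s := pvScan P rem
    let r := pvRounds P k s.2.1
    (s.1 :: r.1, r.2)

-- the (index, size) pair an index denotes
def pvPair (sizes : List Int) (i : Int) : Int × Int := (i, PySem.List.pyGetD sizes i 0)

-- ---- A-side: the popping while-loop is one pvScan over the reversed head ----

lemma pvWhileA_nil (sizes : List Int) (P : Int) (tail : List Int) (cur : Int) (part : List Int) :
    pvWhileA sizes P [] tail cur part = (part, tail) := by
  rw [pvWhileA]; simp

lemma pvWhileA_concat (sizes : List Int) (P : Int) (xs : List Int) (x : Int)
    (tail : List Int) (cur : Int) (part : List Int) :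
    pvWhileA sizes P (xs ++ [x]) tail cur part =
      if PySem.List.pyGetD sizes x 0 ≤ P - cur then
        pvWhileA sizes P xs tail (cur + PySem.List.pyGetD sizes x 0) (part ++ [x])
      else
        pvWhileA sizes P xs (tail ++ [x]) cur part := by
  have h1 : (xs ++ [x]).getLast? = some x := by simp
  rw [pvWhileA]
  split
  next h => rw [h1] at h; cases h
  next elem h =>
    rw [h1] at h; cases h
    simp only [List.dropLast_concat]

lemma pvWhileA_eq_scan (sizes : List Int) (P : Int) :
    ∀ (head tail : List Int) (cur : Int) (part : List Int),
      pvWhileA sizes P head tail cur part =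
        (part ++ (pvScan (P - cur) (head.reverse.map (pvPair sizes))).1,
         tail ++ ((pvScan (P - cur) (head.reverse.map (pvPair sizes))).2.1).map Prod.fst) := by
  intro head
  induction head using List.reverseRecOn with
  | nil => intro tail cur part; simp [pvWhileA_nil, pvScan]
  | append_singleton xs x ih =>
    intro tail cur part
    rw [pvWhileA_concat]
    have hrev : (xs ++ [x]).reverse.map (pvPair sizes)
        = pvPair sizes x :: xs.reverse.map (pvPair sizes) := by simp
    rw [hrev]
    by_cases hc : PySem.List.pyGetD sizes x 0 ≤ P - cur
    · rw [if_pos hc, ih]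
      have e : P - (cur + PySem.List.pyGetD sizes x 0) = P - cur - PySem.List.pyGetD sizes x 0 := by
        ring
      rw [e]
      simp only [pvScan, pvPair]
      rw [if_pos hc]
      simp [List.append_assoc]
    · rw [if_neg hc, ih]
      simp only [pvScan, pvPair]
      rw [if_neg hc]
      simp [List.append_assoc]

lemma pvScan_kept_sublist (cap : Int) (rem : List (Int × Int)) :
    (pvScan cap rem).2.1.Sublist rem := by
  induction rem generalizing cap with
  | nil => simp [pvScan]
  | cons p rest ih =>
    obtain ⟨i, s⟩ := p
    simp only [pvScan]
    split_ifs
    · exact (ih _).cons _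
    · exact (ih _).cons₂ _

lemma pvPair_map_fst_kept (sizes : List Int) (cap : Int) (l : List Int) :
    ((pvScan cap (l.map (pvPair sizes))).2.1.map Prod.fst).map (pvPair sizes)
      = (pvScan cap (l.map (pvPair sizes))).2.1 := by
  have hsub := pvScan_kept_sublist cap (l.map (pvPair sizes))
  have hmem : ∀ p ∈ (pvScan cap (l.map (pvPair sizes))).2.1,
      (pvPair sizes ∘ Prod.fst) p = id p := by
    intro p hp
    obtain ⟨i, hi, rfl⟩ := List.mem_map.1 (hsub.subset hp)
    rfl
  rw [List.map_map, List.map_congr_left hmem, List.map_id]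

lemma pvOuterA_eq_rounds (sizes : List Int) (P : Int) :
    ∀ (k : Nat) (head : List Int) (acc : List (List Int)),
      pvOuterA sizes P k head acc =
        (((pvRounds P k (head.reverse.map (pvPair sizes))).2.map Prod.fst).reverse,
         acc ++ (pvRounds P k (head.reverse.map (pvPair sizes))).1) := by
  intro k
  induction k with
  | zero =>
    intro head acc
    simp [pvOuterA, pvRounds, pvPair, List.map_map, Function.comp_def]
  | succ k ih =>
    intro head acc
    simp only [pvOuterA]
    rw [pvWhileA_eq_scan]
    simp only [List.nil_append, sub_zero]
    rw [ih]
    rw [List.reverse_reverse, pvPair_map_fst_kept]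
    simp only [pvRounds, List.append_assoc, List.cons_append, List.nil_append]

-- ---- B-side: tree invariant and the sweep/scan correspondence ----

def pvMinSz (l : List (Int × Int)) : Option Int :=
  l.foldr (fun p acc => pvMinopt (some p.2) acc) none

def PVTree.actives : PVTree → List (Int × Int)
  | .leaf none _ => []
  | .leaf (some s) i => [(i, s)]
  | .node _ l r => l.actives ++ r.actives

def PVTree.WF : PVTree → Prop
  | .leaf _ _ => True
  | .node mn l r => PVTree.WF l ∧ PVTree.WF r ∧ mn = pvMinopt l.mnOf r.mnOf

lemma pvMinopt_assoc (a b c : Option Int) :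
    pvMinopt (pvMinopt a b) c = pvMinopt a (pvMinopt b c) := by
  have h1 : ∀ b : Option Int, pvMinopt none b = b := fun _ => rfl
  have h2 : ∀ x : Int, pvMinopt (some x) none = some x := fun _ => rfl
  have hsome : ∀ x y : Int, pvMinopt (some x) (some y) = some (min x y) := by
    intro x y
    show (if x ≤ y then some x else some y) = some (min x y)
    split_ifs with hxy <;> simp [min_def, hxy]
  cases a <;> cases b <;> cases c <;> simp only [h1, h2, hsome, min_assoc]

lemma pvMinSz_append (a b : List (Int × Int)) :
    pvMinSz (a ++ b) = pvMinopt (pvMinSz a) (pvMinSz b) := by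
  induction a with
  | nil => simp [pvMinSz, pvMinopt]
  | cons p rest ih =>
    simp only [pvMinSz, List.foldr_cons, List.cons_append] at *
    rw [ih, pvMinopt_assoc]

lemma pvMinSz_eq_none_iff (l : List (Int × Int)) : pvMinSz l = none ↔ l = [] := by
  cases l with
  | nil => simp [pvMinSz]
  | cons p rest =>
    simp only [pvMinSz, List.foldr_cons]
    cases h : List.foldr (fun p acc => pvMinopt (some p.2) acc) none rest <;>
      simp [pvMinopt] <;> split_ifs <;> simp

lemma pvMinSz_le (l : List (Int × Int)) (m : Int) (h : pvMinSz l = some m) :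
    ∀ p ∈ l, m ≤ p.2 := by
  induction l generalizing m with
  | nil => simp
  | cons p rest ih =>
    have hstep : pvMinSz (p :: rest) = pvMinopt (some p.2) (pvMinSz rest) := by
      simp [pvMinSz]
    rw [hstep] at h
    intro q hq
    rcases List.mem_cons.1 hq with rfl | hq
    · cases hcr : pvMinSz rest <;> rw [hcr] at h <;> simp only [pvMinopt] at h
      · cases h; rfl
      · split_ifs at h <;> cases h <;> omega
    · cases hcr : pvMinSz rest <;> rw [hcr] at h <;> simp only [pvMinopt] at h
      · exact absurd hq (by simp [(pvMinSz_eq_none_iff rest).1 hcr])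
      · have hrec := ih _ hcr q hq
        split_ifs at h <;> cases h <;> omega

lemma pvMnOf_eq_minSz (t : PVTree) (ht : t.WF) : t.mnOf = pvMinSz t.actives := by
  induction t with
  | leaf mn i => cases mn <;> simp [PVTree.mnOf, PVTree.actives, pvMinSz, pvMinopt]
  | node mn l r ihl ihr =>
    obtain ⟨hl, hr, hmn⟩ := ht
    simp only [PVTree.mnOf, PVTree.actives]
    rw [hmn, ihl hl, ihr hr, pvMinSz_append]

lemma pvScan_big (cap : Int) (rem : List (Int × Int)) (h : ∀ p ∈ rem, cap < p.2) :
    pvScan cap rem = ([], rem, cap) := by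
  induction rem with
  | nil => simp [pvScan]
  | cons p rest ih =>
    obtain ⟨i, s⟩ := p
    have hs := h (i, s) (by simp)
    simp only [pvScan, if_neg (by omega : ¬ s ≤ cap)]
    rw [ih (fun q hq => h q (by simp [hq]))]

lemma pvScan_append (cap : Int) (a b : List (Int × Int)) :
    pvScan cap (a ++ b) =
      ((pvScan cap a).1 ++ (pvScan (pvScan cap a).2.2 b).1,
       (pvScan cap a).2.1 ++ (pvScan (pvScan cap a).2.2 b).2.1,
       (pvScan (pvScan cap a).2.2 b).2.2) := by
  induction a generalizing cap with
  | nil => simp [pvScan]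
  | cons p rest ih =>
    obtain ⟨i, s⟩ := p
    simp only [pvScan, List.cons_append]
    split_ifs <;> simp [ih]

lemma pvSweep_spec (t : PVTree) (ht : t.WF) (cap : Int) :
    (pvSweep t cap).1.WF ∧
    (pvSweep t cap).1.actives = (pvScan cap t.actives).2.1 ∧
    (pvSweep t cap).2.2 = (pvScan cap t.actives).1 ∧
    (pvSweep t cap).2.1 = (pvScan cap t.actives).2.2 := by
  revert ht cap
  induction t with
  | leaf mn i =>
    intro ht cap
    cases mn with
    | none => simp [pvSweep, PVTree.actives, pvScan, PVTree.WF]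
    | some s =>
      by_cases hc : s > cap
      · simp [pvSweep, if_pos hc, PVTree.actives, pvScan, if_neg (by omega : ¬ s ≤ cap),
          PVTree.WF]
      · simp [pvSweep, if_neg hc, PVTree.actives, pvScan, if_pos (by omega : s ≤ cap),
          PVTree.WF]
  | node mn l r ihl ihr =>
    intro ht cap
    obtain ⟨hl, hr, hmn⟩ := ht
    cases mn with
    | none =>
      have hacts : l.actives ++ r.actives = [] := by
        have hmn' := pvMnOf_eq_minSz (PVTree.node none l r) ⟨hl, hr, hmn⟩
        simp only [PVTree.mnOf] at hmn'
        have h0 := (pvMinSz_eq_none_iff _).1 hmn'.symm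
        simpa [PVTree.actives] using h0
      refine ⟨⟨hl, hr, hmn⟩, ?_, ?_, ?_⟩ <;>
        simp [pvSweep, PVTree.actives, hacts, pvScan]
    | some m =>
      by_cases hc : m > cap
      · have hms : pvMinSz (l.actives ++ r.actives) = some m := by
          have hmn' := pvMnOf_eq_minSz (PVTree.node (some m) l r) ⟨hl, hr, hmn⟩
          simpa [PVTree.mnOf, PVTree.actives] using hmn'.symm
        have hbig : ∀ p ∈ l.actives ++ r.actives, cap < p.2 := by
          intro p hp
          have := pvMinSz_le _ _ hms p hp
          omega
        have hscan := pvScan_big cap _ hbig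
        have hsw0 : pvSweep (PVTree.node (some m) l r) cap
            = (PVTree.node (some m) l r, cap, []) := by
          simp only [pvSweep, if_pos hc]
        rw [hsw0]
        refine ⟨⟨hl, hr, hmn⟩, ?_, ?_, ?_⟩ <;>
          simp [PVTree.actives, hscan]
      · obtain ⟨hW1, hA1, hO1, hC1⟩ := ihl hl cap
        obtain ⟨hW2, hA2, hO2, hC2⟩ := ihr hr (pvSweep l cap).2.1
        have hscanapp := pvScan_append cap l.actives r.actives
        have hsw : pvSweep (PVTree.node (some m) l r) cap =
            (PVTree.node (pvMinopt (pvSweep l cap).1.mnOf (pvSweep r (pvSweep l cap).2.1).1.mnOf)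
              (pvSweep l cap).1 (pvSweep r (pvSweep l cap).2.1).1,
             (pvSweep r (pvSweep l cap).2.1).2.1,
             (pvSweep l cap).2.2 ++ (pvSweep r (pvSweep l cap).2.1).2.2) := by
          simp only [pvSweep, if_neg hc]
        rw [hsw]
        refine ⟨⟨hW1, hW2, rfl⟩, ?_, ?_, ?_⟩
        · simp only [PVTree.actives]
          rw [hA1, hA2, hC1, hscanapp]
        · simp only [PVTree.actives]
          rw [hO1, hO2, hC1, hscanapp]
        · simp only [PVTree.actives]
          rw [hC2, hC1, hscanapp]

lemma pvCollect_eq (t : PVTree) (ht : t.WF) :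
    pvCollect t = t.actives.map Prod.fst := by
  revert ht
  induction t with
  | leaf mn i => intro _; cases mn <;> simp [pvCollect, PVTree.actives]
  | node mn l r ihl ihr =>
    intro ht
    obtain ⟨hl, hr, hmn⟩ := ht
    cases mn with
    | none =>
      have hacts : l.actives ++ r.actives = [] := by
        have hmn' := pvMnOf_eq_minSz (PVTree.node none l r) ⟨hl, hr, hmn⟩
        simp only [PVTree.mnOf] at hmn'
        have h0 := (pvMinSz_eq_none_iff _).1 hmn'.symm
        simpa [PVTree.actives] using h0
      simp [pvCollect, PVTree.actives, hacts]
    | some m =>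
      simp [pvCollect, PVTree.actives, ihl hl, ihr hr]

lemma pvBuild_spec : ∀ (n : Nat) (seg : List (Int × Int)), seg.length = n → seg ≠ [] →
    (pvBuild seg).WF ∧ (pvBuild seg).actives = seg := by
  intro n
  induction n using Nat.strong_induction_on with
  | _ n ih =>
    intro seg hlen hne
    match seg with
    | [] => exact absurd rfl hne
    | [(i, s)] => simp [pvBuild, PVTree.WF, PVTree.actives]
    | p :: q :: rest =>
      have hL : (p :: q :: rest).length = rest.length + 2 := by simp
      have hmid1 : 1 ≤ (p :: q :: rest).length / 2 := by omega
      have hmidL : (p :: q :: rest).length / 2 < (p :: q :: rest).length := by omega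
      have htake : ((p :: q :: rest).take ((p :: q :: rest).length / 2)).length
          = (p :: q :: rest).length / 2 := by
        simp [List.length_take]; omega
      have hdrop : ((p :: q :: rest).drop ((p :: q :: rest).length / 2)).length
          = (p :: q :: rest).length - (p :: q :: rest).length / 2 := by
        simp
      have htne : (p :: q :: rest).take ((p :: q :: rest).length / 2) ≠ [] := by
        intro h0
        rw [h0] at htake
        simp at htake
        omega
      have hdne : (p :: q :: rest).drop ((p :: q :: rest).length / 2) ≠ [] := by
        intro h0
        rw [h0] at hdrop
        simp at hdrop
        omega
      obtain ⟨hWl, hAl⟩ := ih _ (by omega : (p :: q :: rest).length / 2 < n) _ htake htne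
      obtain ⟨hWr, hAr⟩ := ih _
        (by omega : (p :: q :: rest).length - (p :: q :: rest).length / 2 < n) _ hdrop hdne
      rw [pvBuild]
      refine ⟨⟨hWl, hWr, rfl⟩, ?_⟩
      simp only [PVTree.actives]
      rw [hAl, hAr, List.take_append_drop]

def pvActsOpt : Option PVTree → List (Int × Int)
  | none => []
  | some t => t.actives

def pvWFOpt : Option PVTree → Prop
  | none => True
  | some t => t.WF

lemma pvLoopB_spec (P : Int) :
    ∀ (k : Nat) (t : Option PVTree) (acc : List (List Int)), pvWFOpt t →
      pvWFOpt (pvLoopB P k t acc).1 ∧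
      pvActsOpt (pvLoopB P k t acc).1 = (pvRounds P k (pvActsOpt t)).2 ∧
      (pvLoopB P k t acc).2 = acc ++ (pvRounds P k (pvActsOpt t)).1 := by
  intro k
  induction k with
  | zero => intro t acc hW; refine ⟨hW, ?_, ?_⟩ <;> simp [pvLoopB, pvRounds]
  | succ k ih =>
    intro t acc hW
    cases t with
    | none =>
      obtain ⟨h1, h2, h3⟩ := ih none (acc ++ [[]]) trivial
      refine ⟨h1, ?_, ?_⟩
      · simp only [pvLoopB]
        rw [h2]
        simp [pvActsOpt, pvRounds, pvScan]
      · simp only [pvLoopB]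
        rw [h3]
        simp [pvActsOpt, pvRounds, pvScan]
    | some tr =>
      obtain ⟨hW', hA, hO, hC⟩ := pvSweep_spec tr hW P
      obtain ⟨h1, h2, h3⟩ := ih (some (pvSweep tr P).1) (acc ++ [(pvSweep tr P).2.2]) hW'
      refine ⟨h1, ?_, ?_⟩
      · simp only [pvLoopB]
        rw [h2]
        simp only [pvActsOpt, pvRounds]
        rw [hA]
      · simp only [pvLoopB]
        rw [h3]
        simp only [pvActsOpt, pvRounds]
        rw [hO, hA]
        simp [List.append_assoc]

lemma pvAlt_eq (sizes : List Int) (np : Int) :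
    split_partitions_alt sizes np =
      (pvRounds (PySem.Int.floordiv (sizes.sum + np - 1) np) (np - 1).toNat
        (((PySem.List.sorted (PySem.List.pyRange 0 sizes.length 1)
          (fun k => PySem.List.pyGetD sizes k 0) false).reverse).map (pvPair sizes))).1 ++
      [(((pvRounds (PySem.Int.floordiv (sizes.sum + np - 1) np) (np - 1).toNat
        (((PySem.List.sorted (PySem.List.pyRange 0 sizes.length 1)
          (fun k => PySem.List.pyGetD sizes k 0) false).reverse).map (pvPair sizes))).2).map
            Prod.fst).reverse] := by
  unfold split_partitions_alt
  have hpair : (fun i => (i, PySem.List.pyGetD sizes i 0)) = pvPair sizes := rfl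
  simp only [hpair]
  set P := PySem.Int.floordiv (sizes.sum + np - 1) np with hP
  set items := ((PySem.List.sorted (PySem.List.pyRange 0 sizes.length 1)
      (fun k => PySem.List.pyGetD sizes k 0) false).reverse).map (pvPair sizes) with hitems
  have ht0 : ∀ (t0 : Option PVTree), pvWFOpt t0 → pvActsOpt t0 = items →
      (pvLoopB P (np - 1).toNat t0 []).2 ++
        [(match (pvLoopB P (np - 1).toNat t0 []).1 with
          | none => ([] : List Int)
          | some tr => pvCollect tr).reverse] =
      (pvRounds P (np - 1).toNat items).1 ++
        [((pvRounds P (np - 1).toNat items).2.map Prod.fst).reverse] := by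
    intro t0 hW0 hA0
    obtain ⟨hWf, hActs, hParts⟩ := pvLoopB_spec P (np - 1).toNat t0 [] hW0
    rw [hA0] at hActs hParts
    rw [hParts, List.nil_append]
    cases hft : (pvLoopB P (np - 1).toNat t0 []).1 with
    | none =>
      rw [hft] at hActs
      simp only [pvActsOpt] at hActs
      rw [← hActs]
      simp
    | some tr =>
      rw [hft] at hActs hWf
      simp only [pvActsOpt, pvWFOpt] at hActs hWf
      simp [pvCollect_eq tr hWf, hActs]
  cases hit : items with
  | nil =>
    simpa [hit] using ht0 none trivial (by simp [pvActsOpt, hit])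
  | cons p rest =>
    have hb := pvBuild_spec (p :: rest).length (p :: rest) rfl (by simp)
    simpa [hit] using ht0 (some (pvBuild (p :: rest)))
      (by simpa [pvWFOpt] using hb.1) (by simpa [pvActsOpt, hit] using hb.2)

-- ===== VERDICT (by name: the statement is the Claim_ definition above) =====
theorem split_partitions_spec : Claim_equal_split_partitions := by
  intro sizes np _hdom _hpre
  unfold Spec_split_partitions
  unfold split_partitions
  simp only [pvOuterA_eq_rounds]
  rw [pvAlt_eq]
  simp
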